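-- pv_equiv track=rewrite | github.com/Toootless/dashboard | app/report_generator.py | parse_job_status
-- ===== SOURCE A (Python) =====
-- def parse_job_status(filename):
--     """
--     Parse the status from a job filename or folder name.
--
--     Convention:
--         __Rejected_Interview_CompanyName_JobName_JobNumber → rejected_interview
--         Rejected_Interview_CompanyName_JobName_JobNumber → rejected_interview
--         __Interview_CompanyName_JobName_JobNumber         → interview
--         Interview_CompanyName_JobName_JobNumber          → interview
--         __Rejected_CompanyName_JobName_JobNumber         → rejected
--         Rejected_CompanyName_JobName_JobNumber           → rejected
--         CompanyName_JobName_JobNumber                     → applied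
--
--     Args:
--         filename: The filename or folder name to parse
--
--     Returns:
--         (status, remainder) where remainder is the name with prefix removed
--     """
--     # Strip leading underscores, dashes, and dots first
--     cleaned = filename.lstrip('_-.')
--
--     status_prefixes = [
--         ('Rejected_Interview_', 'rejected_interview'),
--         ('Rejected_',           'rejected'),
--         ('Interview_',          'interview'),
--     ]
--
--     for prefix, status in status_prefixes:
--         if cleaned.lower().startswith(prefix.lower()):
--             return status, cleaned[len(prefix):]
--
--     return 'applied', cleaned
-- ===== SOURCE B (Python) =====
-- def parse_job_status(filename):
--     """Token-based reimplementation: split the cleaned name on '_' and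
--     inspect the leading tokens instead of testing each prefix string."""
--     cleaned = filename.lstrip('_-.')
--     parts = cleaned.split('_')
--     if len(parts) >= 2 and parts[0].lower() == 'rejected':
--         if len(parts) >= 3 and parts[1].lower() == 'interview':
--             return 'rejected_interview', '_'.join(parts[2:])
--         return 'rejected', '_'.join(parts[1:])
--     if len(parts) >= 2 and parts[0].lower() == 'interview':
--         return 'interview', '_'.join(parts[1:])
--     return 'applied', cleaned
-- ===== Notes on version B (the rewrite author's own statement) =====
-- stated objective: alternative
-- what changed: B tokenises the cleaned name on underscores with str.split and inspects the leading tokens, rebuilding the remainder with a join, instead of A's loop testing each lowered prefix string with startswith and slicing.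
import Mathlib
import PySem

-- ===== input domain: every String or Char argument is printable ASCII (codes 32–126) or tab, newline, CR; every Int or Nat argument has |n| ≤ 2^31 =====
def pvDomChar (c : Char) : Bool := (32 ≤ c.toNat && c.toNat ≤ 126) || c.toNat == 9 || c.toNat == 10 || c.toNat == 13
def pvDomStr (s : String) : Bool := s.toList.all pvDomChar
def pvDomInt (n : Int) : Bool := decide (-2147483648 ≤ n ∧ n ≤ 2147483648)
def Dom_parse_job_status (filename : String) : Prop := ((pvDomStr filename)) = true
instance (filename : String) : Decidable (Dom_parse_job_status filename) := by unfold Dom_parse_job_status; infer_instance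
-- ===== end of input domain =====

-- B re-implements the prefix matching by tokenising the cleaned name on underscores
-- (split/join) instead of A's lowered-startswith prefix loop; same cost, different
-- decomposition ("alternative").

-- ===== PORT A =====
-- `filename.lstrip('_-.')` — ported by hand (PySem has no lstrip-with-chars): drop leading
-- chars belonging to the set {'_','-','.'}; exact for any string.
def pjsLstrip (cs : List Char) : List Char :=
  cs.dropWhile (fun c => c == '_' || c == '-' || c == '.')

-- the `for prefix, status in status_prefixes:` loop with its early return
def pjsLoop (cleaned : List Char) : List (List Char × String) → String × String
  | [] => ("applied", String.ofList cleaned)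
  | (pre, status) :: rest =>
    if PySem.Chars.startswith (PySem.Chars.lower cleaned) (PySem.Chars.lower pre) then
      (status, String.ofList (PySem.Chars.slice cleaned (some (pre.length : Int)) none))
    else pjsLoop cleaned rest

def parse_job_status (filename : String) : String × String :=
  pjsLoop (pjsLstrip filename.toList)
    [("Rejected_Interview_".toList, "rejected_interview"),
     ("Rejected_".toList, "rejected"),
     ("Interview_".toList, "interview")]

-- ===== PORT B =====
def pjsAltCore (cleaned : List Char) : String × String :=
  let parts := PySem.Chars.splitOn cleaned ['_']
  if decide (2 ≤ parts.length) && (PySem.Chars.lower (parts.getD 0 []) == "rejected".toList) then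
    if decide (3 ≤ parts.length) && (PySem.Chars.lower (parts.getD 1 []) == "interview".toList) then
      ("rejected_interview", String.ofList (PySem.Chars.join ['_'] (parts.drop 2)))
    else ("rejected", String.ofList (PySem.Chars.join ['_'] (parts.drop 1)))
  else if decide (2 ≤ parts.length) && (PySem.Chars.lower (parts.getD 0 []) == "interview".toList) then
    ("interview", String.ofList (PySem.Chars.join ['_'] (parts.drop 1)))
  else ("applied", String.ofList cleaned)

def parse_job_status_alt (filename : String) : String × String :=
  pjsAltCore (pjsLstrip filename.toList)

-- ===== PRECONDITION & SPEC =====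
def Spec_parse_job_status (filename : String) (out : String × String) : Prop := out = parse_job_status_alt filename
instance (filename : String) (out : String × String) : Decidable (Spec_parse_job_status filename out) := by unfold Spec_parse_job_status; infer_instance

-- ===== CLAIM (what is proved, stated in full; the proofs are below) =====
def Claim_equal_parse_job_status : Prop := ∀ (filename : String), Dom_parse_job_status filename → Spec_parse_job_status filename (parse_job_status filename)

-- ===== LEMMAS AND PROOFS =====

lemma pjs_lowerChar_underscore (c : Char) : PySem.Chars.lowerChar c = '_' ↔ c = '_' := by
  constructor
  · intro h
    unfold PySem.Chars.lowerChar at h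
    by_cases hu : PySem.Chars.isupper c = true
    · rw [if_pos hu] at h
      have h2 := congrArg Char.toNat h
      rw [Char.toNat_ofNat] at h2
      by_cases hv : (c.toNat + 32).isValidChar
      · rw [if_pos hv] at h2
        have hc : c = '?' := by
          have : c.toNat = 63 := by
            have : ('_').toNat = 95 := by decide
            omega
          have h3 := congrArg Char.ofNat this
          rw [Char.ofNat_toNat] at h3
          rw [h3]
        exact absurd hu (by rw [hc]; decide)
      · rw [if_neg hv] at h2
        exact absurd h2 (by decide)
    · rwa [if_neg hu] at h
  · intro h; subst h; decide

lemma pjs_go_eq (fuel : Nat) (l cur : List Char) (acc : List (List Char))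
    (h : l.length < fuel) :
    PySem.Chars.splitOn.go ['_'] fuel l cur acc
      = acc.reverse ++ (l.splitOn '_').modifyHead (fun x => cur.reverse ++ x) := by
  induction fuel generalizing l cur acc with
  | zero => omega
  | succ f ih =>
    cases l with
    | nil =>
      simp [PySem.Chars.splitOn.go, List.splitOn]
    | cons c rest =>
      have hrest : rest.length < f := by simpa using h
      by_cases hc : c = '_'
      · subst hc
        have hstep : PySem.Chars.splitOn.go ['_'] (f+1) ('_'::rest) cur acc
            = PySem.Chars.splitOn.go ['_'] f rest [] (cur.reverse :: acc) := by
          simp [PySem.Chars.splitOn.go, List.isPrefixOf]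
        rw [hstep, ih _ _ _ hrest]
        have : (rest.splitOn '_').modifyHead (fun x => List.reverse [] ++ x)
            = rest.splitOn '_' := by
          cases hsp : rest.splitOn '_' <;> simp
        rw [this]
        simp [List.splitOn, List.splitOnP_cons]
      · have hstep : PySem.Chars.splitOn.go ['_'] (f+1) (c::rest) cur acc
            = PySem.Chars.splitOn.go ['_'] f rest (c :: cur) acc := by
          simp [PySem.Chars.splitOn.go, List.isPrefixOf, Ne.symm hc]
        rw [hstep, ih _ _ _ hrest]
        obtain ⟨x, xs, hx⟩ : ∃ x xs, rest.splitOn '_' = x :: xs := by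
          rcases hsp : rest.splitOn '_' with _ | ⟨x, xs⟩
          · exact absurd hsp (List.splitOnP_ne_nil _ _)
          · exact ⟨x, xs, rfl⟩
        simp [List.splitOn, List.splitOnP_cons, hc]
        have hx' : rest.splitOnP (fun b => b == '_') = x :: xs := hx
        simp [hx']

lemma pjs_splitOn_eq (cs : List Char) :
    PySem.Chars.splitOn cs ['_'] = cs.splitOn '_' := by
  unfold PySem.Chars.splitOn
  rw [pjs_go_eq _ _ _ _ (by omega)]
  cases hsp : cs.splitOn '_' <;> simp

lemma pjs_splitOn_no (cs : List Char) (h : '_' ∉ cs) : cs.splitOn '_' = [cs] := by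
  induction cs with
  | nil => simp [List.splitOn]
  | cons c rest ih =>
    have hc : ¬ (c = '_') := fun hg => h (by simp [hg])
    have hr : '_' ∉ rest := fun hg => h (by simp [hg])
    simp [List.splitOn, List.splitOnP_cons, hc] at ih ⊢
    simp [ih hr]

lemma pjs_splitOn_mid (t r : List Char) (ht : '_' ∉ t) :
    (t ++ '_'::r).splitOn '_' = t :: r.splitOn '_' := by
  induction t with
  | nil => simp [List.splitOn, List.splitOnP_cons]
  | cons c t' ih =>
    have hc : ¬ (c = '_') := fun hg => ht (by simp [hg])
    have ht' : '_' ∉ t' := fun hg => ht (by simp [hg])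
    have := ih ht'
    simp [List.splitOn, List.splitOnP_cons, hc] at this ⊢
    simp [this]

lemma pjs_prefix_iff (s p : List Char) (hp : '_' ∉ p) :
    p ++ ['_'] <+: PySem.Chars.lower s
      ↔ ('_' ∈ s ∧ PySem.Chars.lower (s.takeWhile (fun c => !(c == '_'))) = p) := by
  induction s generalizing p with
  | nil =>
    simp [PySem.Chars.lower]
  | cons c s' ih =>
    cases p with
    | nil =>
      simp only [List.nil_append, PySem.Chars.lower, List.map_cons]
      constructor
      · intro h
        have h1 : '_' = PySem.Chars.lowerChar c := (List.cons_prefix_cons.mp h).1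
        have hc : c = '_' := (pjs_lowerChar_underscore c).mp h1.symm
        subst hc
        simp [List.takeWhile]
      · rintro ⟨hm, htw⟩
        have hc : c = '_' := by
          by_contra hc
          simp [hc] at htw
        subst hc
        simp [List.cons_prefix_cons]
        decide
    | cons q p' =>
      have hq : ¬ (q = '_') := fun hg => hp (by simp [hg])
      have hp' : '_' ∉ p' := fun hg => hp (by simp [hg])
      by_cases hc : c = '_'
      · subst hc
        constructor
        · intro h
          have h1 := (List.cons_prefix_cons.mp (by simpa [PySem.Chars.lower] using h)).1
          have : PySem.Chars.lowerChar '_' = '_' := by decide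
          exact absurd (h1.trans this) hq
        · rintro ⟨hm, htw⟩
          simp [PySem.Chars.lower] at htw
      · have hlow : PySem.Chars.lower (c :: s') = PySem.Chars.lowerChar c :: PySem.Chars.lower s' := by
          simp [PySem.Chars.lower]
        rw [hlow]
        rw [List.cons_append, List.cons_prefix_cons]
        constructor
        · rintro ⟨hqc, hpre⟩
          obtain ⟨hm, htw⟩ := (ih p' hp').mp hpre
          refine ⟨by simp [hm], ?_⟩
          simp [hc, PySem.Chars.lower] at htw ⊢
          exact ⟨hqc.symm, htw⟩
        · rintro ⟨hm, htw⟩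
          simp [hc, PySem.Chars.lower] at htw
          refine ⟨htw.1.symm, (ih p' hp').mpr ⟨?_, ?_⟩⟩
          · rcases List.mem_cons.mp hm with h | h
            · exact absurd h.symm hc
            · exact h
          · simpa [PySem.Chars.lower] using htw.2

lemma pjs_decomp (s : List Char) (h : '_' ∈ s) :
    s = s.takeWhile (fun c => !(c == '_')) ++ '_' :: (s.dropWhile (fun c => !(c == '_'))).tail := by
  induction s with
  | nil => cases h
  | cons c s' ih =>
    by_cases hc : c = '_'
    · subst hc; simp
    · have hm : '_' ∈ s' := by
        rcases List.mem_cons.mp h with h | h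
        · exact absurd h.symm hc
        · exact h
      simpa [List.takeWhile_cons, List.dropWhile_cons, hc] using congrArg (c :: ·) (ih hm)

lemma pjs_not_mem_takeWhile (s : List Char) :
    '_' ∉ s.takeWhile (fun c => !(c == '_')) := by
  intro h
  have := List.mem_takeWhile_imp h
  simp at this

lemma pjs_split_head (r p : List Char) :
    (2 ≤ (r.splitOn '_').length ∧ PySem.Chars.lower ((r.splitOn '_').getD 0 []) = p)
      ↔ ('_' ∈ r ∧ PySem.Chars.lower (r.takeWhile (fun c => !(c == '_'))) = p) := by
  by_cases hm : '_' ∈ r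
  · have hdec := pjs_decomp r hm
    have h4 := pjs_splitOn_mid (r.takeWhile (fun c => !(c == '_')))
      ((r.dropWhile (fun c => !(c == '_'))).tail) (pjs_not_mem_takeWhile r)
    rw [← hdec] at h4
    rw [h4]
    have hpos : 0 < ((r.dropWhile (fun c => !(c == '_'))).tail.splitOn '_').length :=
      List.length_pos_of_ne_nil (List.splitOnP_ne_nil _ _)
    simp [hm]
    omega
  · rw [pjs_splitOn_no r hm]
    simp [hm]

lemma pjs_slice_drop (s : List Char) (k : Nat) (h : k ≤ s.length) :
    PySem.Chars.slice s (some (k : Int)) none = s.drop k := by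
  simp [PySem.Chars.slice, PySem.List.slice, PySem.List.clampIdx]
  rw [min_eq_left h]
  apply List.take_of_length_le
  simp

lemma pjs_lower_decomp (t r : List Char) :
    PySem.Chars.lower (t ++ '_'::r) = (PySem.Chars.lower t ++ ['_']) ++ PySem.Chars.lower r := by
  simp [PySem.Chars.lower]
  decide

lemma pjs_len_lower (t p : List Char) (h : PySem.Chars.lower t = p) : t.length = p.length := by
  rw [← h]; simp [PySem.Chars.lower]

lemma pjs_drop_concat (t r : List Char) (n : Nat) :
    (t ++ '_'::r).drop (t.length + 1 + n) = r.drop n := by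
  have h1 : t ++ '_'::r = (t ++ ['_']) ++ r := by simp
  rw [h1, List.drop_append]
  have h2 : List.drop (t.length + 1 + n) (t ++ ['_']) = [] :=
    List.drop_eq_nil_of_le (by simp)
  rw [h2]
  simp only [List.nil_append, List.length_append, List.length_cons, List.length_nil]
  congr 1
  omega

lemma pjs_main (s : List Char) :
    pjsLoop s [("Rejected_Interview_".toList, "rejected_interview"),
               ("Rejected_".toList, "rejected"),
               ("Interview_".toList, "interview")] = pjsAltCore s := by
  simp only [pjsLoop, pjsAltCore, pjs_splitOn_eq]
  by_cases hr : ("rejected".toList ++ ['_']) <+: PySem.Chars.lower s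
  · obtain ⟨hmem, htw⟩ := (pjs_prefix_iff s "rejected".toList (by decide)).mp hr
    have hdec := pjs_decomp s hmem
    set t := s.takeWhile (fun c => !(c == '_')) with htdef
    set r := (s.dropWhile (fun c => !(c == '_'))).tail with hrdef
    have hsplit : s.splitOn '_' = t :: r.splitOn '_' := by
      have h4 := pjs_splitOn_mid t r (pjs_not_mem_takeWhile s)
      rw [← hdec] at h4; exact h4
    have htlen : t.length = 8 := by
      have := pjs_len_lower t _ htw
      rw [show ("rejected".toList).length = 8 from by decide] at this; exact this
    have hlows : PySem.Chars.lower s = ("rejected".toList ++ ['_']) ++ PySem.Chars.lower r := by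
      calc PySem.Chars.lower s = PySem.Chars.lower (t ++ '_'::r) := by rw [← hdec]
        _ = (PySem.Chars.lower t ++ ['_']) ++ PySem.Chars.lower r := pjs_lower_decomp t r
        _ = _ := by rw [htw]
    have hb1 : (decide (2 ≤ (s.splitOn '_').length)
        && (PySem.Chars.lower ((s.splitOn '_').getD 0 []) == "rejected".toList)) = true := by
      simp only [Bool.and_eq_true, decide_eq_true_eq, beq_iff_eq]
      exact (pjs_split_head s "rejected".toList).mpr ⟨hmem, htw⟩
    rw [if_pos hb1]
    by_cases hi : ("interview".toList ++ ['_']) <+: PySem.Chars.lower r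
    · obtain ⟨hmem2, htw2⟩ := (pjs_prefix_iff r "interview".toList (by decide)).mp hi
      have hdec2 := pjs_decomp r hmem2
      set t2 := r.takeWhile (fun c => !(c == '_')) with ht2def
      set r2 := (r.dropWhile (fun c => !(c == '_'))).tail with hr2def
      have hsplit2 : r.splitOn '_' = t2 :: r2.splitOn '_' := by
        have h4 := pjs_splitOn_mid t2 r2 (pjs_not_mem_takeWhile r)
        rw [← hdec2] at h4; exact h4
      have ht2len : t2.length = 9 := by
        have := pjs_len_lower t2 _ htw2
        rw [show ("interview".toList).length = 9 from by decide] at this; exact this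
      have hc1 : PySem.Chars.startswith (PySem.Chars.lower s)
          (PySem.Chars.lower ("Rejected_Interview_".toList)) = true := by
        rw [PySem.Chars.startswith_iff,
          show PySem.Chars.lower ("Rejected_Interview_".toList)
            = ("rejected".toList ++ ['_']) ++ ("interview".toList ++ ['_']) from by decide, hlows]
        exact (List.prefix_append_right_inj _).mpr hi
      rw [if_pos hc1]
      have hne2 : r2.splitOn '_' ≠ [] := List.splitOnP_ne_nil _ _
      have hb2 : (decide (3 ≤ (s.splitOn '_').length)
          && (PySem.Chars.lower ((s.splitOn '_').getD 1 []) == "interview".toList)) = true := by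
        simp only [Bool.and_eq_true, decide_eq_true_eq, beq_iff_eq]
        rw [hsplit, hsplit2]
        refine ⟨?_, ?_⟩
        · have hpos := List.length_pos_of_ne_nil hne2
          simp only [List.length_cons]
          omega
        · have hgd : List.getD (t :: t2 :: r2.splitOn '_') 1 [] = t2 := rfl
          rw [hgd]; exact htw2
      rw [if_pos hb2]
      have h19le : 19 ≤ s.length := by
        have h1 : s.length = t.length + 1 + r.length := by rw [hdec]; simp only [List.length_append, List.length_cons]; omega
        have h2 : r.length = t2.length + 1 + r2.length := by rw [hdec2]; simp only [List.length_append, List.length_cons]; omega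
        omega
      have hslice : PySem.Chars.slice s (some (("Rejected_Interview_".toList).length : Int)) none
          = s.drop 19 := by
        rw [show ("Rejected_Interview_".toList).length = 19 from by decide]
        exact pjs_slice_drop s 19 h19le
      rw [hslice]
      have hdrop : s.drop 19 = r2 := by
        rw [hdec, show (19:Nat) = t.length + 1 + 10 from by omega, pjs_drop_concat]
        rw [hdec2, show (10:Nat) = t2.length + 1 + 0 from by omega, pjs_drop_concat]
        simp
      rw [hdrop, hsplit, hsplit2]
      have hd2 : List.drop 2 (t :: t2 :: r2.splitOn '_') = r2.splitOn '_' := rfl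
      rw [hd2]
      have hjoin : PySem.Chars.join ['_'] (r2.splitOn '_') = r2 := by
        unfold PySem.Chars.join
        exact List.intercalate_splitOn r2 '_'
      rw [hjoin]
    · have hc1 : ¬ (PySem.Chars.startswith (PySem.Chars.lower s)
          (PySem.Chars.lower ("Rejected_Interview_".toList)) = true) := by
        rw [PySem.Chars.startswith_iff,
          show PySem.Chars.lower ("Rejected_Interview_".toList)
            = ("rejected".toList ++ ['_']) ++ ("interview".toList ++ ['_']) from by decide, hlows]
        intro h; exact hi ((List.prefix_append_right_inj _).mp h)
      rw [if_neg hc1]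
      have hc2 : PySem.Chars.startswith (PySem.Chars.lower s)
          (PySem.Chars.lower ("Rejected_".toList)) = true := by
        rw [PySem.Chars.startswith_iff,
          show PySem.Chars.lower ("Rejected_".toList) = "rejected".toList ++ ['_'] from by decide]
        exact hr
      rw [if_pos hc2]
      have hb2 : ¬ ((decide (3 ≤ (s.splitOn '_').length)
          && (PySem.Chars.lower ((s.splitOn '_').getD 1 []) == "interview".toList)) = true) := by
        simp only [Bool.and_eq_true, decide_eq_true_eq, beq_iff_eq]
        rintro ⟨h3, h4⟩
        apply hi
        apply (pjs_prefix_iff r "interview".toList (by decide)).mpr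
        apply (pjs_split_head r "interview".toList).mp
        rw [hsplit] at h3 h4
        refine ⟨?_, ?_⟩
        · simp only [List.length_cons] at h3
          omega
        · exact h4
      rw [if_neg hb2]
      have h9le : 9 ≤ s.length := by
        have h1 : s.length = t.length + 1 + r.length := by rw [hdec]; simp only [List.length_append, List.length_cons]; omega
        omega
      have hslice : PySem.Chars.slice s (some (("Rejected_".toList).length : Int)) none
          = s.drop 9 := by
        rw [show ("Rejected_".toList).length = 9 from by decide]
        exact pjs_slice_drop s 9 h9le
      rw [hslice]
      have hdrop : s.drop 9 = r := by
        rw [hdec, show (9:Nat) = t.length + 1 + 0 from by omega, pjs_drop_concat]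
        simp
      rw [hdrop, hsplit]
      have hd1 : List.drop 1 (t :: r.splitOn '_') = r.splitOn '_' := rfl
      rw [hd1]
      have hjoin : PySem.Chars.join ['_'] (r.splitOn '_') = r := by
        unfold PySem.Chars.join
        exact List.intercalate_splitOn r '_'
      rw [hjoin]
  · have hb1 : ¬ ((decide (2 ≤ (s.splitOn '_').length)
        && (PySem.Chars.lower ((s.splitOn '_').getD 0 []) == "rejected".toList)) = true) := by
      simp only [Bool.and_eq_true, decide_eq_true_eq, beq_iff_eq]
      rintro ⟨h3, h4⟩
      exact hr ((pjs_prefix_iff s "rejected".toList (by decide)).mpr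
        ((pjs_split_head s "rejected".toList).mp ⟨h3, h4⟩))
    rw [if_neg hb1]
    have hc1 : ¬ (PySem.Chars.startswith (PySem.Chars.lower s)
        (PySem.Chars.lower ("Rejected_Interview_".toList)) = true) := by
      rw [PySem.Chars.startswith_iff,
        show PySem.Chars.lower ("Rejected_Interview_".toList)
          = ("rejected".toList ++ ['_']) ++ ("interview".toList ++ ['_']) from by decide]
      intro h
      exact hr ((List.prefix_append _ _).trans h)
    rw [if_neg hc1]
    have hc2 : ¬ (PySem.Chars.startswith (PySem.Chars.lower s)
        (PySem.Chars.lower ("Rejected_".toList)) = true) := by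
      rw [PySem.Chars.startswith_iff,
        show PySem.Chars.lower ("Rejected_".toList) = "rejected".toList ++ ['_'] from by decide]
      exact hr
    rw [if_neg hc2]
    by_cases hv : ("interview".toList ++ ['_']) <+: PySem.Chars.lower s
    · obtain ⟨hmem, htw⟩ := (pjs_prefix_iff s "interview".toList (by decide)).mp hv
      have hdec := pjs_decomp s hmem
      set t := s.takeWhile (fun c => !(c == '_')) with htdef
      set r := (s.dropWhile (fun c => !(c == '_'))).tail with hrdef
      have hsplit : s.splitOn '_' = t :: r.splitOn '_' := by
        have h4 := pjs_splitOn_mid t r (pjs_not_mem_takeWhile s)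
        rw [← hdec] at h4; exact h4
      have htlen : t.length = 9 := by
        have := pjs_len_lower t _ htw
        rw [show ("interview".toList).length = 9 from by decide] at this; exact this
      have hc3 : PySem.Chars.startswith (PySem.Chars.lower s)
          (PySem.Chars.lower ("Interview_".toList)) = true := by
        rw [PySem.Chars.startswith_iff,
          show PySem.Chars.lower ("Interview_".toList) = "interview".toList ++ ['_'] from by decide]
        exact hv
      rw [if_pos hc3]
      have hb2 : (decide (2 ≤ (s.splitOn '_').length)
          && (PySem.Chars.lower ((s.splitOn '_').getD 0 []) == "interview".toList)) = true := by
        simp only [Bool.and_eq_true, decide_eq_true_eq, beq_iff_eq]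
        exact (pjs_split_head s "interview".toList).mpr ⟨hmem, htw⟩
      rw [if_pos hb2]
      have h10le : 10 ≤ s.length := by
        have h1 : s.length = t.length + 1 + r.length := by rw [hdec]; simp only [List.length_append, List.length_cons]; omega
        omega
      have hslice : PySem.Chars.slice s (some (("Interview_".toList).length : Int)) none
          = s.drop 10 := by
        rw [show ("Interview_".toList).length = 10 from by decide]
        exact pjs_slice_drop s 10 h10le
      rw [hslice]
      have hdrop : s.drop 10 = r := by
        rw [hdec, show (10:Nat) = t.length + 1 + 0 from by omega, pjs_drop_concat]
        simp
      rw [hdrop, hsplit]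
      have hd1 : List.drop 1 (t :: r.splitOn '_') = r.splitOn '_' := rfl
      rw [hd1]
      have hjoin : PySem.Chars.join ['_'] (r.splitOn '_') = r := by
        unfold PySem.Chars.join
        exact List.intercalate_splitOn r '_'
      rw [hjoin]
    · have hc3 : ¬ (PySem.Chars.startswith (PySem.Chars.lower s)
          (PySem.Chars.lower ("Interview_".toList)) = true) := by
        rw [PySem.Chars.startswith_iff,
          show PySem.Chars.lower ("Interview_".toList) = "interview".toList ++ ['_'] from by decide]
        exact hv
      rw [if_neg hc3]
      have hb2 : ¬ ((decide (2 ≤ (s.splitOn '_').length)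
          && (PySem.Chars.lower ((s.splitOn '_').getD 0 []) == "interview".toList)) = true) := by
        simp only [Bool.and_eq_true, decide_eq_true_eq, beq_iff_eq]
        rintro ⟨h3, h4⟩
        exact hv ((pjs_prefix_iff s "interview".toList (by decide)).mpr
          ((pjs_split_head s "interview".toList).mp ⟨h3, h4⟩))
      rw [if_neg hb2]

-- ===== VERDICT (by name: the statement is the Claim_ definition above) =====
theorem parse_job_status_spec : Claim_equal_parse_job_status := by
  intro filename _
  show parse_job_status filename = parse_job_status_alt filename
  unfold parse_job_status parse_job_status_alt
  exact pjs_main (pjsLstrip filename.toList)
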